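-- pv_equiv track=rewrite | github.com/Eagle-Rock-Analytics/historical-obs-platform | test_platform/scripts/3_qaqc_data/qaqc_climatological_outlier.py | get_filter_indices
-- ===== SOURCE A (Python) =====
-- def get_filter_indices(years):
--
--     month_low, month_high, filter_low, filter_high = [],[],[],[]
--
--     for yr in range(len(years)):
--         if yr == 0:
--             month_low.append(0)
--             month_high.append(3)
--             filter_low.append(2)
--             filter_high.append(5)
--         elif yr == 1:
--             month_low.append(0)
--             month_high.append(4)
--             filter_low.append(1)
--             filter_high.append(5)
--         elif yr == len(years)-2:
--             month_low.append(-4)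
--             month_high.append(-1)
--             filter_low.append(0)
--             filter_high.append(3)
--         elif yr == len(years)-1:
--             month_low.append(-3)
--             month_high.append(-1)
--             filter_low.append(0)
--             filter_high.append(2)
--         else:
--             month_low.append(yr-2)
--             month_high.append(yr+3)
--             filter_low.append(0)
--             filter_high.append(5)
--     return month_low, month_high, filter_low, filter_high
-- ===== SOURCE B (Python) =====
-- def get_filter_indices(years):
--     n = len(years)
--     # interior formula everywhere, then patch the four boundary positions;
--     # back patches first so the front patches win on overlap (tiny n)
--     month_low = [yr - 2 for yr in range(n)]
--     month_high = [yr + 3 for yr in range(n)]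
--     filter_low = [0] * n
--     filter_high = [5] * n
--
--     def patch(i, ml, mh, fl, fh):
--         if 0 <= i < n:
--             month_low[i] = ml
--             month_high[i] = mh
--             filter_low[i] = fl
--             filter_high[i] = fh
--
--     patch(n - 2, -4, -1, 0, 3)
--     patch(n - 1, -3, -1, 0, 2)
--     patch(0, 0, 3, 2, 5)
--     patch(1, 0, 4, 1, 5)
--     return month_low, month_high, filter_low, filter_high
-- ===== Notes on version B (the rewrite author's own statement) =====
-- stated objective: alternative
-- what changed: Instead of A's per-index five-way elif chain inside one loop, B fills all four lists with the interior formula in a single branch-free pass and then patches the four boundary positions by bounds-checked direct assignment (back patches before front so the front wins on overlap).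
import Mathlib
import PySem

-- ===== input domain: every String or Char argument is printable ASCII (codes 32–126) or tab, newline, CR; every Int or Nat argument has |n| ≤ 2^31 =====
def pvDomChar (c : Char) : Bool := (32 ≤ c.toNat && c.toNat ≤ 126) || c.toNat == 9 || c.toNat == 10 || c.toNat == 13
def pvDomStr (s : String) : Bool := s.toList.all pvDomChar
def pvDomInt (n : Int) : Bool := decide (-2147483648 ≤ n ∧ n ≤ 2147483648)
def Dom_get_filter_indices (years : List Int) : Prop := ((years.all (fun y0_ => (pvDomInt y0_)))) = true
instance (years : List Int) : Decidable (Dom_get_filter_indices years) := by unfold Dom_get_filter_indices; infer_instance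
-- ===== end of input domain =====

-- B builds the four lists with the interior formula in one pass and then patches the four
-- boundary positions by direct (bounds-checked) assignment, back patches before front
-- patches, instead of A's per-index five-way branch; objective: alternative decomposition.

-- ===== PORT A =====
def get_filter_indices (years : List Int) : List Int × List Int × List Int × List Int :=
  (List.range years.length).foldl
    (fun (st : List Int × List Int × List Int × List Int) (yr : Nat) =>
      if (yr : Int) = 0 then
        (st.1 ++ [0], st.2.1 ++ [3], st.2.2.1 ++ [2], st.2.2.2 ++ [5])
      else if (yr : Int) = 1 then
        (st.1 ++ [0], st.2.1 ++ [4], st.2.2.1 ++ [1], st.2.2.2 ++ [5])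
      else if (yr : Int) = (years.length : Int) - 2 then
        (st.1 ++ [-4], st.2.1 ++ [-1], st.2.2.1 ++ [0], st.2.2.2 ++ [3])
      else if (yr : Int) = (years.length : Int) - 1 then
        (st.1 ++ [-3], st.2.1 ++ [-1], st.2.2.1 ++ [0], st.2.2.2 ++ [2])
      else
        (st.1 ++ [(yr : Int) - 2], st.2.1 ++ [(yr : Int) + 3], st.2.2.1 ++ [0], st.2.2.2 ++ [5]))
    ([], [], [], [])

-- ===== PORT B =====
-- Source B's `patch`: overwrite position i in all four lists, only if 0 <= i < n
def pvPatch (n : Nat) (i ml mh fl fh : Int)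
    (st : List Int × List Int × List Int × List Int) :
    List Int × List Int × List Int × List Int :=
  if 0 ≤ i ∧ i < (n : Int) then
    (st.1.set i.toNat ml, st.2.1.set i.toNat mh, st.2.2.1.set i.toNat fl, st.2.2.2.set i.toNat fh)
  else st

def get_filter_indices_alt (years : List Int) : List Int × List Int × List Int × List Int :=
  pvPatch years.length 1 0 4 1 5
    (pvPatch years.length 0 0 3 2 5
      (pvPatch years.length ((years.length : Int) - 1) (-3) (-1) 0 2
        (pvPatch years.length ((years.length : Int) - 2) (-4) (-1) 0 3
          ((List.range years.length).map (fun yr : Nat => (yr : Int) - 2),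
           (List.range years.length).map (fun yr : Nat => (yr : Int) + 3),
           List.replicate years.length 0,
           List.replicate years.length 5))))

-- ===== PRECONDITION & SPEC =====
def Spec_get_filter_indices (years : List Int) (out : List Int × List Int × List Int × List Int) : Prop := out = get_filter_indices_alt years
instance (years : List Int) (out : List Int × List Int × List Int × List Int) : Decidable (Spec_get_filter_indices years out) := by unfold Spec_get_filter_indices; infer_instance

-- ===== CLAIM (what is proved, stated in full; the proofs are below) =====
def Claim_equal_get_filter_indices : Prop := ∀ (years : List Int), Dom_get_filter_indices years → Spec_get_filter_indices years (get_filter_indices years)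

-- ===== LEMMAS AND PROOFS =====

-- the scalar each of A's four lists receives at loop index y when the total length is n
def pvG1 (n y : Int) : Int :=
  if y = 0 then 0 else if y = 1 then 0 else if y = n - 2 then -4 else if y = n - 1 then -3 else y - 2
def pvG2 (n y : Int) : Int :=
  if y = 0 then 3 else if y = 1 then 4 else if y = n - 2 then -1 else if y = n - 1 then -1 else y + 3
def pvG3 (n y : Int) : Int :=
  if y = 0 then 2 else if y = 1 then 1 else if y = n - 2 then 0 else if y = n - 1 then 0 else 0
def pvG4 (n y : Int) : Int :=
  if y = 0 then 5 else if y = 1 then 5 else if y = n - 2 then 3 else if y = n - 1 then 2 else 5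

theorem pvA_fold (n : Nat) (l : List Nat) (ml mh fl fh : List Int) :
    l.foldl
      (fun (st : List Int × List Int × List Int × List Int) (yr : Nat) =>
        if (yr : Int) = 0 then
          (st.1 ++ [0], st.2.1 ++ [3], st.2.2.1 ++ [2], st.2.2.2 ++ [5])
        else if (yr : Int) = 1 then
          (st.1 ++ [0], st.2.1 ++ [4], st.2.2.1 ++ [1], st.2.2.2 ++ [5])
        else if (yr : Int) = (n : Int) - 2 then
          (st.1 ++ [-4], st.2.1 ++ [-1], st.2.2.1 ++ [0], st.2.2.2 ++ [3])
        else if (yr : Int) = (n : Int) - 1 then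
          (st.1 ++ [-3], st.2.1 ++ [-1], st.2.2.1 ++ [0], st.2.2.2 ++ [2])
        else
          (st.1 ++ [(yr : Int) - 2], st.2.1 ++ [(yr : Int) + 3], st.2.2.1 ++ [0], st.2.2.2 ++ [5]))
      (ml, mh, fl, fh)
    = (ml ++ l.map (fun y : Nat => pvG1 n (y : Int)),
       mh ++ l.map (fun y : Nat => pvG2 n (y : Int)),
       fl ++ l.map (fun y : Nat => pvG3 n (y : Int)),
       fh ++ l.map (fun y : Nat => pvG4 n (y : Int))) := by
  induction l generalizing ml mh fl fh with
  | nil => simp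
  | cons y t ih =>
    simp only [List.foldl_cons, List.map_cons]
    split_ifs <;> (rw [ih]; simp [pvG1, pvG2, pvG3, pvG4, *, List.append_assoc]) <;> (try split_ifs) <;> omega

theorem get_filter_indices_spec : Claim_equal_get_filter_indices := by
  intro years _
  show get_filter_indices years = get_filter_indices_alt years
  unfold get_filter_indices get_filter_indices_alt
  rw [pvA_fold]
  generalize years.length = n
  rcases Nat.lt_or_ge n 2 with hn | hn
  · interval_cases n <;> decide
  · have h2 : pvPatch n ((n : Int) - 2) (-4) (-1) 0 3 = fun st =>
        (st.1.set (n - 2) (-4), st.2.1.set (n - 2) (-1), st.2.2.1.set (n - 2) 0, st.2.2.2.set (n - 2) 3) := by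
      funext st
      have ht : ((n : Int) - 2).toNat = n - 2 := by omega
      simp only [pvPatch, ht]
      rw [if_pos (by constructor <;> omega)]
    have h1 : pvPatch n ((n : Int) - 1) (-3) (-1) 0 2 = fun st =>
        (st.1.set (n - 1) (-3), st.2.1.set (n - 1) (-1), st.2.2.1.set (n - 1) 0, st.2.2.2.set (n - 1) 2) := by
      funext st
      have ht : ((n : Int) - 1).toNat = n - 1 := by omega
      simp only [pvPatch, ht]
      rw [if_pos (by constructor <;> omega)]
    have h0 : pvPatch n 0 0 3 2 5 = fun st =>
        (st.1.set 0 0, st.2.1.set 0 3, st.2.2.1.set 0 2, st.2.2.2.set 0 5) := by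
      funext st
      simp only [pvPatch, Int.toNat_zero]
      rw [if_pos (by constructor <;> omega)]
    have hh1 : pvPatch n 1 0 4 1 5 = fun st =>
        (st.1.set 1 0, st.2.1.set 1 4, st.2.2.1.set 1 1, st.2.2.2.set 1 5) := by
      funext st
      simp only [pvPatch, Int.toNat_one]
      rw [if_pos (by constructor <;> omega)]
    rw [h2, h1, h0, hh1]
    simp only [Prod.mk.injEq]
    refine ⟨?_, ?_, ?_, ?_⟩ <;>
    · apply List.ext_getElem
      · simp
      · intro j hj hj'
        simp only [List.length_set, List.length_map, List.length_range, List.length_replicate,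
          List.nil_append] at hj hj' ⊢
        simp only [List.getElem_set, List.getElem_map, List.getElem_range,
          List.getElem_replicate, pvG1, pvG2, pvG3, pvG4]
        split_ifs <;> omega
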